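-- pv_equiv track=rewrite | github.com/Balan666/TestTasks | task1/task1.py | circular_array_path
-- ===== SOURCE A (Python) =====
-- def circular_array_path(n, m):
--     circular_array = list(range(1, n + 1))
--
--     path = []
--     current_index = 0
--
--     for _ in range(n):
--         path.append(circular_array[current_index])
--         current_index = (current_index + m - 1) % n
--         if current_index == 0:
--             break
--
--     return ''.join(map(str, path))
-- ===== SOURCE B (Python) =====
-- def circular_array_path(n, m):
--     if n <= 0:
--         return ''
--     g = (m - 1) % n
--     # cycle length L = n // gcd(n, g): the step index returns to 0 after exactly L hops
--     a, b = n, g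
--     while b:
--         a, b = b, a % b
--     L = n // a
--     return ''.join(str(i * g % n + 1) for i in range(L))
-- ===== Notes on version B (the rewrite author's own statement) =====
-- stated objective: simpler
-- what changed: Instead of walking the circle step by step and breaking when the index returns to 0, B computes the step g = (m-1) % n and the closed-form cycle length L = n // gcd(n, g) and emits the visited values directly as i*g % n + 1 for i in range(L).
import Mathlib
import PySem

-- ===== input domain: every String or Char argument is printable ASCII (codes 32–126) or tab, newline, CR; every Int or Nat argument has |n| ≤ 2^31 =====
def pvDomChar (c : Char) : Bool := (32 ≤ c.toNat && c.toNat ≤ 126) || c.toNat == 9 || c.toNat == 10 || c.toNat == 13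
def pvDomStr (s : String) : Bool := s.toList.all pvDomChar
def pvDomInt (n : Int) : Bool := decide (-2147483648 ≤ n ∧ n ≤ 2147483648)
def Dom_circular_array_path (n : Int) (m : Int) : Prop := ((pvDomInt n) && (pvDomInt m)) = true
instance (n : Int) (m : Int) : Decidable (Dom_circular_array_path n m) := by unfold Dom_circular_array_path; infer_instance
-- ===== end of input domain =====

-- B replaces A's step-by-step walk with a break test by the closed-form cycle length
-- L = n // gcd(n, (m-1) % n) and generates the visited values directly (objective: simpler).

-- ===== PORT A =====
-- the for-loop with its break: fuel = n, state = current_index; the `none` branch is unreachable (index always in range)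
def pvALoop (arr : List Int) (n : Int) (m : Int) : Nat → Int → List Int
  | 0, _ => []
  | Nat.succ k, ci =>
    match PySem.List.pyGet? arr ci with
    | none => []
    | some v =>
      let ci' := PySem.Int.mod (ci + m - 1) n
      if ci' = 0 then [v] else v :: pvALoop arr n m k ci'

def circular_array_path (n : Int) (m : Int) : String :=
  PySem.Str.join "" ((pvALoop (PySem.List.pyRange 1 (n + 1) 1) n m n.toNat 0).map PySem.Int.toStr)

-- ===== PORT B =====
-- Source B's hand-written Euclid loop: while b: a, b = b, a % b
def pvGcd (a b : Nat) : Nat :=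
  if b = 0 then a else pvGcd b (a % b)
termination_by b
decreasing_by exact Nat.mod_lt _ (Nat.pos_of_ne_zero (by assumption))

def circular_array_path_alt (n : Int) (m : Int) : String :=
  if n ≤ 0 then "" else
    PySem.Str.join "" ((PySem.List.pyRange 0
        (PySem.Int.floordiv n ((pvGcd n.toNat (PySem.Int.mod (m - 1) n).toNat : Nat) : Int)) 1).map
      (fun i => PySem.Int.toStr (PySem.Int.mod (i * PySem.Int.mod (m - 1) n) n + 1)))

-- ===== PRECONDITION & SPEC =====
def Spec_circular_array_path (n : Int) (m : Int) (out : String) : Prop := out = circular_array_path_alt n m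
instance (n : Int) (m : Int) (out : String) : Decidable (Spec_circular_array_path n m out) := by unfold Spec_circular_array_path; infer_instance

-- ===== CLAIM (what is proved, stated in full; the proofs are below) =====
def Claim_equal_circular_array_path : Prop := ∀ (n : Int) (m : Int), Dom_circular_array_path n m → Spec_circular_array_path n m (circular_array_path n m)

-- ===== LEMMAS AND PROOFS =====

lemma pvGcd_eq (b a : Nat) : pvGcd a b = Nat.gcd a b := by
  induction b using Nat.strong_induction_on generalizing a with
  | _ b ih =>
    rw [pvGcd]
    by_cases hb : b = 0
    · simp [hb]
    · simp only [hb, if_false]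
      rw [ih (a % b) (Nat.mod_lt _ (Nat.pos_of_ne_zero hb)) b]
      conv_rhs => rw [Nat.gcd_comm, Nat.gcd_rec, Nat.gcd_comm]

-- additive order of G in Z/N: t*G % N = 0 iff N/gcd(N,G) divides t
lemma order_iff (N G : Nat) (hN : 0 < N) (t : Nat) :
    (t * G) % N = 0 ↔ (N / Nat.gcd N G) ∣ t := by
  have hd : 0 < Nat.gcd N G := Nat.gcd_pos_of_pos_left _ hN
  have hdN : Nat.gcd N G ∣ N := Nat.gcd_dvd_left _ _
  have hdG : Nat.gcd N G ∣ G := Nat.gcd_dvd_right _ _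
  rw [← Nat.dvd_iff_mod_eq_zero]
  constructor
  · intro h
    have h1 : (N / Nat.gcd N G) * Nat.gcd N G ∣ (t * (G / Nat.gcd N G)) * Nat.gcd N G := by
      rwa [Nat.div_mul_cancel hdN, Nat.mul_assoc, Nat.div_mul_cancel hdG]
    have h2 : (N / Nat.gcd N G) ∣ t * (G / Nat.gcd N G) :=
      (Nat.mul_dvd_mul_iff_right hd).mp h1
    exact (Nat.coprime_div_gcd_div_gcd hd).dvd_of_dvd_mul_right h2
  · intro h
    have h1 : N ∣ (N / Nat.gcd N G) * G := by
      calc N = (N / Nat.gcd N G) * Nat.gcd N G := (Nat.div_mul_cancel hdN).symm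
      _ ∣ (N / Nat.gcd N G) * G := Nat.mul_dvd_mul_left _ hdG
    exact h1.trans (Nat.mul_dvd_mul_right h G)

-- one step of A's loop lands on index ((j+1)*G) % N; unrolled, the loop from index (j*G) % N
-- produces exactly the values of indices j, j+1, …, L-1 where L = N / gcd N G
lemma aloop_spec (n m : Int) (hn : 0 < n) (N G : Nat) (hNn : (N : Int) = n)
    (hG : ((G : Nat) : Int) = PySem.Int.mod (m - 1) n) :
    ∀ (k j : Nat), j < N / Nat.gcd N G → N / Nat.gcd N G ≤ k + j →
      pvALoop (PySem.List.pyRange 1 (n + 1) 1) n m k (((j * G) % N : Nat) : Int)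
      = (List.range (N / Nat.gcd N G - j)).map (fun i => ((((j + i) * G) % N : Nat) : Int) + 1) := by
  have hN : 0 < N := by
    have := hNn ▸ hn; exact_mod_cast this
  have harr : PySem.List.pyRange 1 (n + 1) 1 = (List.range N).map (fun k : Nat => (1 : Int) + (k : Int)) := by
    rw [PySem.List.pyRange_one]
    have : (n + 1 - 1).toNat = N := by omega
    rw [this]
  intro k
  induction k with
  | zero => intro j hj hle; omega
  | succ k ih =>
    intro j hj hle
    have hc : (j * G) % N < N := Nat.mod_lt _ hN
    have hget : PySem.List.pyGet? (PySem.List.pyRange 1 (n + 1) 1) (((j * G) % N : Nat) : Int)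
        = some ((1 : Int) + ((j * G) % N : Nat)) := by
      rw [harr, PySem.List.pyGet?_natCast]
      simp [hc]
    have hstep : PySem.Int.mod ((((j * G) % N : Nat) : Int) + m - 1) n
        = ((((j + 1) * G) % N : Nat) : Int) := by
      have hgval : (m - 1) % n = ((G : Nat) : Int) := by
        rw [hG, PySem.Int.mod_eq_emod_of_pos hn]
      have h1 : ((((j * G) % N : Nat) : Int) + m - 1)
          = (((j * G) % N : Nat) : Int) + (m - 1) := by ring
      have h2 : (((j * G) % N : Nat) : Int) % n = (((j * G) % N : Nat) : Int) :=
        Int.emod_eq_of_lt (by positivity) (by rw [← hNn]; exact_mod_cast hc)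
      rw [PySem.Int.mod_eq_emod_of_pos hn, h1, Int.add_emod, hgval, h2]
      have h3 : ((((j * G) % N : Nat) : Int) + ((G : Nat) : Int)) = (((j * G) % N + G : Nat) : Int) := by
        push_cast; ring
      have h4 : ((j * G) % N + G) % N = ((j + 1) * G) % N := by
        rw [Nat.mod_add_mod]; congr 1; ring
      rw [h3, ← hNn]
      exact_mod_cast congrArg (fun x : Nat => (x : Int)) h4
    rw [pvALoop, hget, hstep]
    simp only []
    by_cases hz : ((((j + 1) * G) % N : Nat) : Int) = 0
    · have hz' : ((j + 1) * G) % N = 0 := by exact_mod_cast hz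
      have hdvd : (N / Nat.gcd N G) ∣ (j + 1) := (order_iff N G hN (j + 1)).mp hz'
      have hjL : j + 1 = N / Nat.gcd N G :=
        Nat.le_antisymm (by omega) (Nat.le_of_dvd (by omega) hdvd)
      have hLj : N / Nat.gcd N G - j = 1 := by omega
      rw [if_pos hz, hLj]
      simp [add_comm]
    · rw [if_neg hz]
      have hz' : ((j + 1) * G) % N ≠ 0 := fun h => hz (by exact_mod_cast congrArg (Nat.cast : Nat → Int) h)
      have hj1 : j + 1 < N / Nat.gcd N G := by
        rcases Nat.lt_or_ge (j + 1) (N / Nat.gcd N G) with h | h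
        · exact h
        · exfalso
          have : j + 1 = N / Nat.gcd N G := by omega
          exact hz' ((order_iff N G hN (j + 1)).mpr (this ▸ dvd_refl _))
      rw [ih (j + 1) hj1 (by omega)]
      have hsplit : N / Nat.gcd N G - j = (N / Nat.gcd N G - (j + 1)) + 1 := by omega
      rw [hsplit, List.range_succ_eq_map, List.map_cons, List.map_map]
      congr 1
      · simp [add_comm]
      · apply List.map_congr_left
        intro i _
        simp only [Function.comp, Nat.succ_eq_add_one]
        have h5 : j + (i + 1) = j + 1 + i := by omega
        rw [← h5]

theorem circular_array_path_spec : Claim_equal_circular_array_path := by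
  intro n m _
  unfold Spec_circular_array_path circular_array_path circular_array_path_alt
  by_cases hn : n ≤ 0
  · rw [if_pos hn]
    have h0 : n.toNat = 0 := by omega
    rw [h0]
    rfl
  · rw [if_neg hn]
    have hn' : 0 < n := by omega
    obtain ⟨N, hNn⟩ : ∃ N : Nat, (N : Int) = n := ⟨n.toNat, Int.toNat_of_nonneg hn'.le⟩
    subst hNn
    have hN : 0 < N := by exact_mod_cast hn'
    obtain ⟨G, hG⟩ : ∃ G : Nat, ((G : Nat) : Int) = PySem.Int.mod (m - 1) (N : Int) :=
      ⟨_, Int.toNat_of_nonneg (PySem.Int.mod_nonneg _ hn')⟩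
    rw [← hG, Int.toNat_natCast, Int.toNat_natCast]
    have hL : PySem.Int.floordiv (N : Int) ((pvGcd N G : Nat) : Int) = ((N / Nat.gcd N G : Nat) : Int) := by
      rw [pvGcd_eq, PySem.Int.floordiv_natCast]
    have hd : 0 < Nat.gcd N G := Nat.gcd_pos_of_pos_left _ hN
    have hLpos : 0 < N / Nat.gcd N G :=
      Nat.div_pos (Nat.le_of_dvd hN (Nat.gcd_dvd_left _ _)) hd
    have hmain := aloop_spec (N : Int) m hn' N G rfl hG N 0 hLpos
      (by simpa using Nat.div_le_self N (Nat.gcd N G))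
    conv_lhs => rw [show (0 : Int) = (((0 * G) % N : Nat) : Int) by simp, hmain]
    rw [hL]
    conv_rhs => rw [PySem.List.pyRange_one]
    rw [show (((N / Nat.gcd N G : Nat) : Int) - 0).toNat = N / Nat.gcd N G by rw [Int.sub_zero, Int.toNat_natCast]]
    rw [List.map_map, List.map_map]
    apply congrArg
    apply List.map_congr_left
    intro i _
    simp only [Function.comp, zero_add]
    apply congrArg
    apply congrArg (fun x => x + 1)
    rw [show ((i : Nat) : Int) * ((G : Nat) : Int) = ((i * G : Nat) : Int) by push_cast; ring,
      PySem.Int.mod_natCast]
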